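-- pv_equiv track=rewrite | github.com/nickb14/AdventOfCode2021 | day18/d18p1.py | magnitudeDict
-- ===== SOURCE A (Python) =====
-- def magnitudeDict(dictnum, i): #I was too lazy to make a magnitudeList don't @ me
--     if len(dictnum) == 1:
--         return list(dictnum.values())[0] #idk
--     dictnum0, dictnum1 = {}, {} #recursive in half type stuff
--     for strnum, num in dictnum.items():
--         if strnum[i] == '0':
--             dictnum0[strnum] = num
--         else:
--             dictnum1[strnum] = num
--     l = magnitudeDict(dictnum0, i+3)
--     r = magnitudeDict(dictnum1, i+3)
--     return 3*l + 2*r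
-- ===== SOURCE B (Python) =====
-- def magnitudeDict(dictnum, i):
--     # A single remaining number is its own magnitude.
--     if len(dictnum) == 1:
--         return next(iter(dictnum.values()))
--     # One pass over the leaves: each number contributes value * product of
--     # per-level weights (3 for a left/'0' branch, 2 for a right branch)
--     # read from its path-encoded key at positions i, i+3, i+6, ...
--     total = 0
--     for strnum, num in dictnum.items():
--         factor = 1
--         for j in range(i, len(strnum), 3):
--             factor *= 3 if strnum[j] == '0' else 2
--         total += num * factor
--     return total
-- ===== Notes on version B (the rewrite author's own statement) =====
-- stated objective: faster
-- what changed: Replaces A's level-by-level recursive bisection (which rebuilds two fresh dicts at every tree level) by a single pass that adds value * product of per-branch weights (3 for '0', 2 otherwise) along each key's encoded path (a lone entry is returned as is); Pre_ admits every singleton dict and the multi-entry dicts whose key paths form the leaf set of a full binary tree (prefix-free and Kraft-complete) — elsewhere A recurses forever (RecursionError), raises IndexError, or returns a value that ignores a key's trailing path characters once its subtree is a singleton.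
-- outside the precondition, e.g. on magnitudeDict({'0ab': 1, '1cdX': 2}, 0): A returns 7, B returns 11; on magnitudeDict({'00': 1, '01': 2}, 0): A raises IndexError, B returns 9
import Mathlib
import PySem

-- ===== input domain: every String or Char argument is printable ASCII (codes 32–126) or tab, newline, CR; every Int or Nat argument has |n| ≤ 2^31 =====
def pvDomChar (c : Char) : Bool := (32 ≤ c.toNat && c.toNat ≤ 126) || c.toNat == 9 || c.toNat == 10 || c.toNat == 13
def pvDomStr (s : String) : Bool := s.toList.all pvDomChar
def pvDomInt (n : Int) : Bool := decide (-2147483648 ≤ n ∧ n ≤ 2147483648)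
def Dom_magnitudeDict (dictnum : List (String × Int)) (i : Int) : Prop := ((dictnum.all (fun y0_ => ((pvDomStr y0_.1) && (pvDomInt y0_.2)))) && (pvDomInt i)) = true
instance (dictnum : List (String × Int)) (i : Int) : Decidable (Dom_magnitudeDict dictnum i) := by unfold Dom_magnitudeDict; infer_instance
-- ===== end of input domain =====

-- B replaces A's recursive bisection by one weighted pass over the leaves; equivalence is
-- proved on key sets whose encoded paths form the leaf set of a full binary tree (Pre_).

-- ===== PORT A =====
-- A recursively splits the dict by the character at position i ('0' side / other side),
-- recursing at i+3.  The `if h : … < …` guard only makes the recursion total: where it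
-- fails (an empty half), the Python recurses forever (RecursionError) — outside Pre_.
def magnitudeDict (dictnum : List (String × Int)) (i : Int) : Int :=
  if dictnum.length = 1 then
    -- list(dictnum.values())[0]
    ((dictnum.map Prod.snd).headD 0)
  else
    let parts := dictnum.foldl
      (fun (acc : PySem.Dict String Int × PySem.Dict String Int) kv =>
        if PySem.Str.pyGet? kv.1 i = some '0' then (acc.1.insert kv.1 kv.2, acc.2)
        else (acc.1, acc.2.insert kv.1 kv.2))
      (PySem.Dict.empty, PySem.Dict.empty)
    if h : parts.1.items.length < dictnum.length ∧ parts.2.items.length < dictnum.length then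
      3 * magnitudeDict parts.1.items (i + 3) + 2 * magnitudeDict parts.2.items (i + 3)
    else 0
termination_by dictnum.length
decreasing_by exacts [h.1, h.2]

-- ===== PORT B =====
-- a lone number is its own magnitude; otherwise one pass:
-- total += num * (product over j in range(i, len(strnum), 3) of (3 if strnum[j]=='0' else 2))
def magnitudeDict_alt (dictnum : List (String × Int)) (i : Int) : Int :=
  if dictnum.length = 1 then ((dictnum.map Prod.snd).headD 0)
  else
    dictnum.foldl
      (fun total kv =>
        total + kv.2 * ((PySem.List.pyRange i (PySem.Str.len kv.1) 3).foldl
          (fun factor j => factor * (if PySem.Str.pyGet? kv.1 j = some '0' then 3 else 2)) 1))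
      0

-- ===== PRECONDITION & SPEC =====
-- The path a key encodes from position i: its characters at i, i+3, i+6, … read as bits
-- (true = '0' = left).  Closed form: ceil((len-i)/3) positions.
def pathOf (s : List Char) (i : Int) : List Bool :=
  (List.range ((s.length - i.toNat + 2) / 3)).map
    (fun j => s.getD (i.toNat + 3 * j) ' ' == '0')

def pathsOf (dictnum : List (String × Int)) (i : Int) : List (List Bool) :=
  dictnum.map (fun kv => pathOf kv.1.toList i)

-- neither of p, q is a prefix of the other
def npb (p q : List Bool) : Bool := !(p.isPrefixOf q) && !(q.isPrefixOf p)

-- Kraft sum scaled by 2^M (M = deepest leaf), in ℕ so that `decide` can evaluate it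
def maxLen (P : List (List Bool)) : Nat := (P.map List.length).foldr Nat.max 0

def kraftN (P : List (List Bool)) (M : Nat) : Nat := (P.map (fun p => 2 ^ (M - p.length))).sum

-- Pre_ admits every singleton dict, and the multi-entry dicts whose key paths (read from
-- position i in steps of 3) form the leaf set of a full binary tree (prefix-free and
-- Kraft-complete).  It excludes the rest: there A recurses forever, raises IndexError, or
-- (when a key carries path characters past the point where its subtree became a singleton)
-- returns a value that ignores those characters, an artefact of stopping at len(dict)==1.
def Pre_magnitudeDict (dictnum : List (String × Int)) (i : Int) : Prop :=
  dictnum.length = 1 ∨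
    (0 ≤ i ∧ (pathsOf dictnum i).Pairwise (fun p q => npb p q = true) ∧
      kraftN (pathsOf dictnum i) (maxLen (pathsOf dictnum i))
        = 2 ^ maxLen (pathsOf dictnum i))

instance (dictnum : List (String × Int)) (i : Int) : Decidable (Pre_magnitudeDict dictnum i) := by
  unfold Pre_magnitudeDict; infer_instance

def pvWitness_magnitudeDict : (List (String × Int)) × Int :=
  ([("0, ", 1), ("1, 0", 2), ("1, 1", 3)], 0)

def Spec_magnitudeDict (dictnum : List (String × Int)) (i : Int) (out : Int) : Prop := out = magnitudeDict_alt dictnum i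
instance (dictnum : List (String × Int)) (i : Int) (out : Int) : Decidable (Spec_magnitudeDict dictnum i out) := by unfold Spec_magnitudeDict; infer_instance

-- ===== CLAIM (what is proved, stated in full; the proofs are below) =====
def Claim_equal_magnitudeDict : Prop := ∀ (dictnum : List (String × Int)) (i : Int), Dom_magnitudeDict dictnum i → Pre_magnitudeDict dictnum i → Spec_magnitudeDict dictnum i (magnitudeDict dictnum i)

-- ===== LEMMAS AND PROOFS =====

def kraft (P : List (List Bool)) : ℚ := (P.map (fun p => (1 / 2 : ℚ) ^ p.length)).sum

-- weight of a leaf: product of 3 (left) / 2 (right) along its path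
def pweight (p : List Bool) : Int := (p.map (fun b => if b then (3 : Int) else 2)).prod

def leafSum (dictnum : List (String × Int)) (i : Int) : Int :=
  (dictnum.map (fun kv => kv.2 * pweight (pathOf kv.1.toList i))).sum

theorem pathOf_eq_nil {s : List Char} {i : Int} (h : (s.length : Int) ≤ i) :
    pathOf s i = [] := by
  have : s.length - i.toNat = 0 := by omega
  simp [pathOf, this]

theorem pathOf_cons {s : List Char} {i : Int} (h0 : 0 ≤ i) (h : i < (s.length : Int)) :
    pathOf s i = (s.getD i.toNat ' ' == '0') :: pathOf s (i + 3) := by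
  have hk : (s.length - i.toNat + 2) / 3 = (s.length - (i + 3).toNat + 2) / 3 + 1 := by omega
  unfold pathOf
  rw [hk, List.range_succ_eq_map, List.map_cons, List.map_map]
  refine congrArg₂ List.cons (by norm_num) ?_
  apply List.map_congr_left
  intro j _
  have h3 : i.toNat + 3 * (j + 1) = (i + 3).toNat + 3 * j := by omega
  simp [Function.comp, h3]

theorem pathOf_ne_nil_iff {s : List Char} {i : Int} (h0 : 0 ≤ i) :
    pathOf s i ≠ [] ↔ i < (s.length : Int) := by
  constructor
  · intro h; by_contra hc; exact h (pathOf_eq_nil (by omega))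
  · intro h; rw [pathOf_cons h0 h]; simp

theorem npb_iff {p q : List Bool} : npb p q = true ↔ ¬ p <+: q ∧ ¬ q <+: p := by
  simp [npb, ← List.isPrefixOf_iff_prefix, Bool.not_eq_true]

theorem npb_irrefl (p : List Bool) : ¬ npb p p = true := by
  simp [npb_iff]

theorem npb_nil_left (q : List Bool) : ¬ npb [] q = true := by
  simp [npb_iff]

theorem nodup_of_pairwise_npb {P : List (List Bool)} (h : P.Pairwise (fun p q => npb p q = true)) :
    P.Nodup := by
  refine h.imp (fun {p q} hpq he => ?_)
  subst he; exact npb_irrefl p hpq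

-- in a Nodup list of ≥ 2 elements, every element has a distinct companion
theorem exists_ne_of_nodup {α : Type} {l : List α} (h : 1 < l.length) (hn : l.Nodup)
    {a : α} (ha : a ∈ l) : ∃ b ∈ l, b ≠ a := by
  match l, h with
  | x :: y :: rest, _ =>
    by_cases hax : a = x
    · refine ⟨y, by simp, fun he => ?_⟩
      rw [he, hax] at hn; simp at hn
    · exact ⟨x, by simp, fun he => hax he.symm⟩

theorem ne_nil_of_pairwise {P : List (List Bool)} (h : P.Pairwise (fun p q => npb p q = true))
    (hlen : 1 < P.length) : ∀ p ∈ P, p ≠ [] := by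
  intro p hp he
  subst he
  obtain ⟨q, hq, hqne⟩ := exists_ne_of_nodup hlen (nodup_of_pairwise_npb h) hp
  have hsym : Symmetric (fun p q : List Bool => npb p q = true) := by
    intro a b hab
    rw [npb_iff] at hab ⊢; exact ⟨hab.2, hab.1⟩
  have := h.forall hsym hp hq (fun he => hqne he.symm)
  exact npb_nil_left q this

-- splitting a mapped sum along a Bool predicate
theorem sum_map_filter_split {α M : Type} [AddCommMonoid M] (l : List α) (f : α → M)
    (q : α → Bool) :
    ((l.filter q).map f).sum + ((l.filter (fun x => !q x)).map f).sum = (l.map f).sum := by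
  induction l with
  | nil => simp
  | cons x xs ih =>
    cases hq : q x <;> simp [hq, ← ih] <;> abel

theorem kraft_nonneg (P : List (List Bool)) : 0 ≤ kraft P := by
  unfold kraft
  apply List.sum_nonneg
  intro x hx
  simp only [List.mem_map] at hx
  obtain ⟨p, _, rfl⟩ := hx
  positivity

-- tails: each tail is one shorter
theorem sum_len_tail (Q : List (List Bool)) (h : ∀ p ∈ Q, p ≠ []) :
    ((Q.map List.tail).map List.length).sum + Q.length = (Q.map List.length).sum := by
  induction Q with
  | nil => simp
  | cons p ps ih =>
    have hp : p ≠ [] := h p (by simp)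
    have hlen : p.tail.length + 1 = p.length := by
      cases p with
      | nil => exact absurd rfl hp
      | cons a as => simp
    have hih := ih (fun q hq => h q (by simp [hq]))
    simp only [List.map_cons, List.sum_cons, List.length_cons] at hih ⊢
    omega

theorem kraft_filter_head (Q : List (List Bool)) (hne : ∀ p ∈ Q, p ≠ []) :
    kraft Q = 1 / 2 * kraft (Q.map List.tail) := by
  unfold kraft
  rw [List.map_map, ← List.sum_map_mul_left]
  apply congrArg List.sum
  apply List.map_congr_left
  intro p hp
  have hp' : p ≠ [] := hne p hp
  have hlen : p.length = p.tail.length + 1 := by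
    cases p with
    | nil => exact absurd rfl hp'
    | cons a as => simp
  simp only [Function.comp]
  rw [hlen, pow_succ]
  ring

theorem pairwise_npb_tail {Q : List (List Bool)} {b : Bool} (hne : ∀ p ∈ Q, p ≠ [])
    (hb : ∀ p ∈ Q, p.headI = b) (hp : Q.Pairwise (fun p q => npb p q = true)) :
    (Q.map List.tail).Pairwise (fun p q => npb p q = true) := by
  rw [List.pairwise_map]
  refine hp.imp_of_mem ?_
  intro p q hpm hqm hpq
  rw [npb_iff] at hpq ⊢
  have hpc : b :: p.tail = p := by
    rw [← hb p hpm]; cases p with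
    | nil => exact absurd rfl (hne [] hpm)
    | cons a as => simp
  have hqc : b :: q.tail = q := by
    rw [← hb q hqm]; cases q with
    | nil => exact absurd rfl (hne [] hqm)
    | cons a as => simp
  constructor
  · intro hpre
    exact hpq.1 (by rw [← hpc, ← hqc]; exact List.cons_prefix_cons.mpr ⟨rfl, hpre⟩)
  · intro hpre
    exact hpq.2 (by rw [← hpc, ← hqc]; exact List.cons_prefix_cons.mpr ⟨rfl, hpre⟩)

-- Kraft's inequality for prefix-free families
theorem kraft_le_one : ∀ (n : Nat) (P : List (List Bool)), (P.map List.length).sum ≤ n →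
    P.Pairwise (fun p q => npb p q = true) → kraft P ≤ 1 := by
  intro n
  induction n with
  | zero =>
    intro P hs hp
    match P, hp with
    | [], _ => simp [kraft]
    | [p], _ =>
      unfold kraft
      simp only [List.map_cons, List.map_nil, List.sum_cons, List.sum_nil, add_zero]
      exact pow_le_one₀ (by norm_num) (by norm_num)
    | p :: q :: rest, hp =>
      exfalso
      have hpnil : p = [] := by
        have h0 : p.length = 0 := by
          simp only [List.map_cons, List.sum_cons] at hs; omega
        exact List.eq_nil_of_length_eq_zero h0
      subst hpnil
      exact npb_nil_left q ((List.pairwise_cons.mp hp).1 q (by simp))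
  | succ n ih =>
    intro P hs hp
    match P, hp with
    | [], _ => simp [kraft]
    | [p], _ =>
      unfold kraft
      simp only [List.map_cons, List.map_nil, List.sum_cons, List.sum_nil, add_zero]
      exact pow_le_one₀ (by norm_num) (by norm_num)
    | p₀ :: p₁ :: rest, hp =>
      set P := p₀ :: p₁ :: rest with hP
      have hlen : 1 < P.length := by simp [hP]
      have hne : ∀ p ∈ P, p ≠ [] := ne_nil_of_pairwise hp hlen
      set Q0 := P.filter (fun p => p.headI == true) with hQ0
      set Q1 := P.filter (fun p => !(p.headI == true)) with hQ1
      have hsplit : kraft Q0 + kraft Q1 = kraft P :=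
        sum_map_filter_split P _ (fun p => p.headI == true)
      have hQ0ne : ∀ p ∈ Q0, p ≠ [] := fun p hpm => hne p (List.mem_of_mem_filter hpm)
      have hQ1ne : ∀ p ∈ Q1, p ≠ [] := fun p hpm => hne p (List.mem_of_mem_filter hpm)
      have hb0 : ∀ p ∈ Q0, p.headI = true := by
        intro p hpm; have := List.of_mem_filter hpm; simpa using this
      have hb1 : ∀ p ∈ Q1, p.headI = false := by
        intro p hpm; have := List.of_mem_filter hpm; simpa using this
      have hsub0 : ((Q0.map List.length).sum) ≤ (P.map List.length).sum :=
        List.Sublist.sum_le_sum (List.Sublist.map List.length List.filter_sublist) (by simp)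
      have hsub1 : ((Q1.map List.length).sum) ≤ (P.map List.length).sum :=
        List.Sublist.sum_le_sum (List.Sublist.map List.length List.filter_sublist) (by simp)
      have hk0 : kraft (Q0.map List.tail) ≤ 1 := by
        rcases List.eq_nil_or_concat' Q0 with h0 | ⟨_, _, _⟩
        · rw [h0]; simp [kraft]
        · apply ih
          · have ht := sum_len_tail Q0 hQ0ne
            have : 0 < Q0.length := by
              rename_i l a h0; rw [h0]; simp
            omega
          · exact pairwise_npb_tail hQ0ne hb0 (hp.filter _)
      have hk1 : kraft (Q1.map List.tail) ≤ 1 := by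
        rcases List.eq_nil_or_concat' Q1 with h0 | ⟨_, _, _⟩
        · rw [h0]; simp [kraft]
        · apply ih
          · have ht := sum_len_tail Q1 hQ1ne
            have : 0 < Q1.length := by
              rename_i l a h0; rw [h0]; simp
            omega
          · exact pairwise_npb_tail hQ1ne hb1 (hp.filter _)
      have e0 : kraft Q0 = 1 / 2 * kraft (Q0.map List.tail) := kraft_filter_head Q0 hQ0ne
      have e1 : kraft Q1 = 1 / 2 * kraft (Q1.map List.tail) := kraft_filter_head Q1 hQ1ne
      rw [← hsplit, e0, e1]
      linarith

-- B's inner loop computes the weight of the encoded path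
theorem foldl_mul_eq_prod_map {α : Type} (l : List α) (g : α → Int) :
    l.foldl (fun f j => f * g j) 1 = (l.map g).prod := by
  rw [List.prod_eq_foldl, List.foldl_map]

theorem inner_factor (s : String) (i : Int) (h0 : 0 ≤ i) :
    (PySem.List.pyRange i (PySem.Str.len s) 3).foldl
      (fun factor j => factor * (if PySem.Str.pyGet? s j = some '0' then 3 else 2)) 1
    = pweight (pathOf s.toList i) := by
  rw [PySem.List.pyRange_of_pos _ _ (by norm_num : (0:Int) < 3)]
  rw [List.foldl_map, foldl_mul_eq_prod_map]
  unfold pweight pathOf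
  rw [List.map_map]
  have hK : (if i < PySem.Str.len s then ((PySem.Str.len s - i + 3 - 1) / 3).toNat else 0)
      = (s.toList.length - i.toNat + 2) / 3 := by
    rw [PySem.Str.len_eq]
    split
    · rename_i hlt
      have he : (s.toList.length : Int) - i + 3 - 1 = ((s.toList.length - i.toNat + 2 : Nat) : Int) := by
        push_cast; omega
      rw [he]
      omega
    · rename_i hge
      have : s.toList.length - i.toNat = 0 := by omega
      omega
  rw [hK]
  apply congrArg List.prod
  apply List.map_congr_left
  intro k hk
  rw [List.mem_range] at hk
  have hpos : i.toNat + 3 * k < s.toList.length := by omega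
  have hcast : (i + 3 * (k : Int)).toNat = i.toNat + 3 * k := by omega
  have hget : PySem.Str.pyGet? s (i + 3 * (k : Int)) = some (s.toList[i.toNat + 3 * k]) := by
    have hge : (0:Int) ≤ i + 3 * (k : Int) := by omega
    have hlt : i + 3 * (k : Int) < (s.toList.length : Int) := by omega
    rw [PySem.Str.pyGet?_eq, PySem.Chars.pyGet?_eq_listPyGet?,
      PySem.List.pyGet?_eq_some_getElem s.toList (i := i + 3 * (k : Int)) hge hlt]
    simp only [hcast]
  have hgetD : s.toList.getD (i.toNat + 3 * k) ' ' = s.toList[i.toNat + 3 * k] := by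
    rw [List.getD_eq_getElem?_getD, List.getElem?_eq_getElem hpos]; rfl
  simp only [Function.comp_apply]
  rw [hget, hgetD]
  by_cases hc : s.toList[i.toNat + 3 * k] = '0' <;> simp [hc]

theorem B_eq (dictnum : List (String × Int)) (i : Int) (h1 : dictnum.length ≠ 1)
    (h0 : 0 ≤ i) : magnitudeDict_alt dictnum i = leafSum dictnum i := by
  unfold magnitudeDict_alt leafSum
  rw [if_neg h1, PySem.List.foldl_add]
  rw [zero_add]
  apply congrArg List.sum
  apply List.map_congr_left
  intro kv _
  rw [inner_factor kv.1 i h0]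

-- the dict-building loop over fresh distinct keys appends exactly the filtered items
theorem fold_insert_items (c : String × Int → Prop) [inst : DecidablePred c] :
    ∀ (l : List (String × Int)) (d : PySem.Dict String Int),
    (l.map Prod.fst).Nodup → (∀ kv ∈ l, d.contains kv.1 = false) →
    (l.foldl (fun d kv => if c kv then d.insert kv.1 kv.2 else d) d).items
      = d.items ++ l.filter (fun kv => decide (c kv)) := by
  intro l
  induction l with
  | nil => intro d _ _; simp
  | cons kv rest ih =>
    intro d hnd hfresh
    have hndr : (rest.map Prod.fst).Nodup := by simp at hnd; exact hnd.2
    have hhead : kv.1 ∉ rest.map Prod.fst := by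
      simp only [List.map_cons, List.nodup_cons] at hnd; exact hnd.1
    simp only [List.foldl_cons]
    by_cases hc : c kv
    · rw [if_pos hc]
      have hnotc : d.contains kv.1 = false := hfresh kv (by simp)
      have hfresh' : ∀ kv' ∈ rest, (d.insert kv.1 kv.2).contains kv'.1 = false := by
        intro kv' hm
        rw [PySem.Dict.contains_insert]
        have hne : (kv'.1 == kv.1) = false := by
          apply beq_false_of_ne
          intro he
          exact hhead (he ▸ List.mem_map_of_mem hm)
        rw [hne, hfresh kv' (by simp [hm])]
        rfl
      rw [ih (d.insert kv.1 kv.2) hndr hfresh',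
        PySem.Dict.items_insert_of_not_contains d kv.2 hnotc]
      simp [hc]
    · rw [if_neg hc]
      rw [ih d hndr (fun kv' hm => hfresh kv' (by simp [hm]))]
      simp [hc]

-- filtering commutes with mapping when the predicates agree through the map
theorem map_filter_eq {α β : Type} (l : List α) (f : α → β) (p : α → Bool) (q : β → Bool)
    (h : ∀ x ∈ l, p x = q (f x)) : (l.filter p).map f = (l.map f).filter q := by
  induction l with
  | nil => simp
  | cons x xs ih =>
    have hx := h x (by simp)
    have ihx := ih (fun y hy => h y (by simp [hy]))
    cases hp : p x <;> simp [hp, ← hx, ihx]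

theorem pweight_cons (b : Bool) (t : List Bool) :
    pweight (b :: t) = (if b then 3 else 2) * pweight t := by
  simp [pweight]

-- A's single loop building the two dicts is the pair of the two component loops
theorem fold_pair_split (i : Int) : ∀ (l : List (String × Int))
    (acc : PySem.Dict String Int × PySem.Dict String Int),
    l.foldl (fun acc kv =>
        if PySem.Str.pyGet? kv.1 i = some '0' then (acc.1.insert kv.1 kv.2, acc.2)
        else (acc.1, acc.2.insert kv.1 kv.2)) acc
    = (l.foldl (fun d kv =>
          if PySem.Str.pyGet? kv.1 i = some '0' then d.insert kv.1 kv.2 else d) acc.1,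
       l.foldl (fun d kv =>
          if ¬ PySem.Str.pyGet? kv.1 i = some '0' then d.insert kv.1 kv.2 else d) acc.2) := by
  intro l
  induction l with
  | nil => intro acc; rfl
  | cons kv rest ih =>
    intro acc
    simp only [List.foldl_cons]
    rcases Decidable.em (PySem.Str.pyGet? kv.1 i = some '0') with hc | hc
    · rw [if_pos hc, if_pos hc, if_neg (not_not_intro hc), ih]
    · rw [if_neg hc, if_neg hc, if_pos hc, ih]

-- A computes the weighted leaf sum on every admissible input
theorem A_eq : ∀ (n : Nat) (dictnum : List (String × Int)) (i : Int), dictnum.length ≤ n →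
    0 ≤ i → (pathsOf dictnum i).Pairwise (fun p q => npb p q = true) →
    kraft (pathsOf dictnum i) = 1 → magnitudeDict dictnum i = leafSum dictnum i := by
  intro n
  induction n with
  | zero =>
    intro dictnum i hlen h0 hpf hk
    have hnil : dictnum = [] := List.eq_nil_of_length_eq_zero (by omega)
    subst hnil
    simp [pathsOf, kraft] at hk
  | succ n ih =>
    intro dictnum i hlen h0 hpf hk
    by_cases h1 : dictnum.length = 1
    · obtain ⟨kv, rfl⟩ := List.length_eq_one_iff.mp h1
      have hk1 : ((1:ℚ)/2) ^ (pathOf kv.1.toList i).length = 1 := by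
        simpa [pathsOf, kraft] using hk
      have hzero : (pathOf kv.1.toList i).length = 0 := by
        by_contra hn
        have hlt := pow_lt_one₀ (by norm_num : (0:ℚ) ≤ 1/2) (by norm_num) hn
        rw [hk1] at hlt; exact lt_irrefl 1 hlt
      have hpath : pathOf kv.1.toList i = [] := List.eq_nil_of_length_eq_zero hzero
      rw [magnitudeDict]
      simp [leafSum, hpath, pweight]
    · have hne0 : dictnum ≠ [] := by
        intro he; subst he; simp [pathsOf, kraft] at hk
      have hlen2 : 1 < dictnum.length := by
        have := List.length_pos_of_ne_nil hne0; omega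
      have hplen : (pathsOf dictnum i).length = dictnum.length := by simp [pathsOf]
      have hnen : ∀ p ∈ pathsOf dictnum i, p ≠ [] := ne_nil_of_pairwise hpf (by omega)
      have hvalid : ∀ kv ∈ dictnum, i < (kv.1.toList.length : Int) := by
        intro kv hm
        have hpm : pathOf kv.1.toList i ≠ [] :=
          hnen _ (List.mem_map_of_mem hm)
        exact (pathOf_ne_nil_iff h0).mp hpm
      -- branch predicate agrees with the head bit of the path
      have hhead : ∀ kv ∈ dictnum,
          (decide (PySem.Str.pyGet? kv.1 i = some '0')
            = ((pathOf kv.1.toList i).headI == true)) := by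
        intro kv hm
        have hv := hvalid kv hm
        have hpos : i.toNat < kv.1.toList.length := by omega
        have hget : PySem.Str.pyGet? kv.1 i = some (kv.1.toList[i.toNat]) := by
          rw [PySem.Str.pyGet?_eq, PySem.Chars.pyGet?_eq_listPyGet?,
            PySem.List.pyGet?_eq_some_getElem kv.1.toList h0 hv]
        have hgetD : kv.1.toList.getD i.toNat ' ' = kv.1.toList[i.toNat] := by
          rw [List.getD_eq_getElem?_getD, List.getElem?_eq_getElem hpos]; rfl
        rw [pathOf_cons h0 hv]
        have hget' : PySem.List.pyGet? kv.1.toList i = some (kv.1.toList[i.toNat]) :=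
          PySem.List.pyGet?_eq_some_getElem kv.1.toList h0 hv
        simp only [List.headI_cons, PySem.Str.pyGet?_eq, PySem.Chars.pyGet?_eq_listPyGet?,
          hget', hgetD]
        by_cases hc : kv.1.toList[i.toNat] = '0' <;> simp [hc]
      have hkeys : (dictnum.map Prod.fst).Nodup := by
        have hnd : (pathsOf dictnum i).Nodup := nodup_of_pairwise_npb hpf
        have hmm : pathsOf dictnum i
            = (dictnum.map Prod.fst).map (fun s => pathOf s.toList i) := by
          rw [List.map_map]; rfl
        exact List.Nodup.of_map _ (hmm ▸ hnd)
      -- the two halves of the dict and of the path family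
      have hQ0 : (dictnum.filter (fun kv => decide (PySem.Str.pyGet? kv.1 i = some '0'))).map
            (fun kv => pathOf kv.1.toList i)
          = (pathsOf dictnum i).filter (fun p => p.headI == true) := by
        exact map_filter_eq dictnum _ _ _ hhead
      have hQ1 : (dictnum.filter (fun kv => !decide (PySem.Str.pyGet? kv.1 i = some '0'))).map
            (fun kv => pathOf kv.1.toList i)
          = (pathsOf dictnum i).filter (fun p => !(p.headI == true)) := by
        refine map_filter_eq dictnum _ _ _ ?_
        intro kv hm; rw [hhead kv hm]
      -- Kraft bookkeeping: each half of the tree carries weight exactly 1/2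
      have hQ0ne : ∀ p ∈ (pathsOf dictnum i).filter (fun p => p.headI == true), p ≠ [] :=
        fun p hpm => hnen p (List.mem_of_mem_filter hpm)
      have hQ1ne : ∀ p ∈ (pathsOf dictnum i).filter (fun p => !(p.headI == true)), p ≠ [] :=
        fun p hpm => hnen p (List.mem_of_mem_filter hpm)
      have hsplit : kraft ((pathsOf dictnum i).filter (fun p => p.headI == true))
          + kraft ((pathsOf dictnum i).filter (fun p => !(p.headI == true)))
          = kraft (pathsOf dictnum i) :=
        sum_map_filter_split (pathsOf dictnum i) _ _
      have he0 : kraft ((pathsOf dictnum i).filter (fun p => p.headI == true))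
          = 1 / 2 * kraft (((pathsOf dictnum i).filter (fun p => p.headI == true)).map List.tail) :=
        kraft_filter_head _ hQ0ne
      have he1 : kraft ((pathsOf dictnum i).filter (fun p => !(p.headI == true)))
          = 1 / 2 * kraft (((pathsOf dictnum i).filter (fun p => !(p.headI == true))).map List.tail) :=
        kraft_filter_head _ hQ1ne
      have hb0 : ∀ p ∈ (pathsOf dictnum i).filter (fun p => p.headI == true), p.headI = true := by
        intro p hpm; have := List.of_mem_filter hpm; simpa using this
      have hb1 : ∀ p ∈ (pathsOf dictnum i).filter (fun p => !(p.headI == true)), p.headI = false := by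
        intro p hpm; have := List.of_mem_filter hpm; simpa using this
      have hpt0 := pairwise_npb_tail hQ0ne hb0 (hpf.filter _)
      have hpt1 := pairwise_npb_tail hQ1ne hb1 (hpf.filter _)
      have hk0le : kraft (((pathsOf dictnum i).filter (fun p => p.headI == true)).map List.tail) ≤ 1 :=
        kraft_le_one _ _ le_rfl hpt0
      have hk1le : kraft (((pathsOf dictnum i).filter (fun p => !(p.headI == true))).map List.tail) ≤ 1 :=
        kraft_le_one _ _ le_rfl hpt1
      have hk0nn := kraft_nonneg (((pathsOf dictnum i).filter (fun p => p.headI == true)).map List.tail)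
      have hk1nn := kraft_nonneg (((pathsOf dictnum i).filter (fun p => !(p.headI == true))).map List.tail)
      have hk0 : kraft (((pathsOf dictnum i).filter (fun p => p.headI == true)).map List.tail) = 1 := by
        linarith [hsplit, he0, he1, hk, hk0le, hk1le, hk0nn, hk1nn]
      have hk1 : kraft (((pathsOf dictnum i).filter (fun p => !(p.headI == true))).map List.tail) = 1 := by
        linarith [hsplit, he0, he1, hk, hk0le, hk1le, hk0nn, hk1nn]
      -- both halves are nonempty
      have hQ0nonnil : (pathsOf dictnum i).filter (fun p => p.headI == true) ≠ [] := by
        intro he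
        rw [← hsplit, he, he1, hk1] at hk
        simp only [kraft, List.map_nil, List.sum_nil, zero_add] at hk
        norm_num at hk
      have hQ1nonnil : (pathsOf dictnum i).filter (fun p => !(p.headI == true)) ≠ [] := by
        intro he
        rw [← hsplit, he, he0, hk0] at hk
        simp only [kraft, List.map_nil, List.sum_nil, add_zero] at hk
        norm_num at hk
      have hd0ne : dictnum.filter (fun kv => decide (PySem.Str.pyGet? kv.1 i = some '0')) ≠ [] := by
        intro he; apply hQ0nonnil; rw [← hQ0, he]; rfl
      have hd1ne : dictnum.filter (fun kv => !decide (PySem.Str.pyGet? kv.1 i = some '0')) ≠ [] := by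
        intro he; apply hQ1nonnil; rw [← hQ1, he]; rfl
      have hl0 : (dictnum.filter (fun kv => decide (PySem.Str.pyGet? kv.1 i = some '0'))).length
          < dictnum.length := by
        rw [List.length_filter_lt_length_iff_exists]
        obtain ⟨kv, hm⟩ := List.exists_mem_of_ne_nil _ hd1ne
        obtain ⟨hmem, hp⟩ := List.mem_filter.mp hm
        exact ⟨kv, hmem, by simpa using hp⟩
      have hl1 : (dictnum.filter (fun kv => !decide (PySem.Str.pyGet? kv.1 i = some '0'))).length
          < dictnum.length := by
        rw [List.length_filter_lt_length_iff_exists]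
        obtain ⟨kv, hm⟩ := List.exists_mem_of_ne_nil _ hd0ne
        obtain ⟨hmem, hp⟩ := List.mem_filter.mp hm
        exact ⟨kv, hmem, by simpa using hp⟩
      -- one step of A: split the dict, recurse on the two halves
      have hitems0 : (dictnum.foldl (fun (d : PySem.Dict String Int) kv =>
            if PySem.Str.pyGet? kv.1 i = some '0' then d.insert kv.1 kv.2 else d)
            PySem.Dict.empty).items
          = dictnum.filter (fun kv => decide (PySem.Str.pyGet? kv.1 i = some '0')) := by
        rw [fold_insert_items (fun kv => PySem.Str.pyGet? kv.1 i = some '0') dictnum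
          PySem.Dict.empty hkeys (fun kv _ => PySem.Dict.contains_empty kv.1)]
        rfl
      have hitems1 : (dictnum.foldl (fun (d : PySem.Dict String Int) kv =>
            if ¬ PySem.Str.pyGet? kv.1 i = some '0' then d.insert kv.1 kv.2 else d)
            PySem.Dict.empty).items
          = dictnum.filter (fun kv => !decide (PySem.Str.pyGet? kv.1 i = some '0')) := by
        rw [fold_insert_items (fun kv => ¬ PySem.Str.pyGet? kv.1 i = some '0') dictnum
          PySem.Dict.empty hkeys (fun kv _ => PySem.Dict.contains_empty kv.1)]
        simp [decide_not, show (PySem.Dict.empty : PySem.Dict String Int).items = [] from rfl]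
        rfl
      rw [magnitudeDict, if_neg h1]
      simp only [fold_pair_split, hitems0, hitems1]
      rw [dif_pos ⟨hl0, hl1⟩]
      -- the paths of the halves are the tails of the halves of the paths
      have hps0 : pathsOf (dictnum.filter (fun kv => decide (PySem.Str.pyGet? kv.1 i = some '0'))) (i + 3)
          = ((pathsOf dictnum i).filter (fun p => p.headI == true)).map List.tail := by
        rw [← hQ0, List.map_map]
        apply List.map_congr_left
        intro kv hm
        have hv := hvalid kv (List.mem_of_mem_filter hm)
        simp only [Function.comp_apply]
        rw [pathOf_cons h0 hv, List.tail_cons]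
      have hps1 : pathsOf (dictnum.filter (fun kv => !decide (PySem.Str.pyGet? kv.1 i = some '0'))) (i + 3)
          = ((pathsOf dictnum i).filter (fun p => !(p.headI == true))).map List.tail := by
        rw [← hQ1, List.map_map]
        apply List.map_congr_left
        intro kv hm
        have hv := hvalid kv (List.mem_of_mem_filter hm)
        simp only [Function.comp_apply]
        rw [pathOf_cons h0 hv, List.tail_cons]
      have hrec0 : magnitudeDict (dictnum.filter (fun kv => decide (PySem.Str.pyGet? kv.1 i = some '0'))) (i + 3)
          = leafSum (dictnum.filter (fun kv => decide (PySem.Str.pyGet? kv.1 i = some '0'))) (i + 3) :=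
        ih _ _ (by omega) (by omega) (by rw [hps0]; exact hpt0) (by rw [hps0]; exact hk0)
      have hrec1 : magnitudeDict (dictnum.filter (fun kv => !decide (PySem.Str.pyGet? kv.1 i = some '0'))) (i + 3)
          = leafSum (dictnum.filter (fun kv => !decide (PySem.Str.pyGet? kv.1 i = some '0'))) (i + 3) :=
        ih _ _ (by omega) (by omega) (by rw [hps1]; exact hpt1) (by rw [hps1]; exact hk1)
      rw [hrec0, hrec1]
      -- reassemble the weighted sum
      unfold leafSum
      rw [← sum_map_filter_split dictnum (fun kv => kv.2 * pweight (pathOf kv.1.toList i))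
        (fun kv => decide (PySem.Str.pyGet? kv.1 i = some '0'))]
      have hsum0 : ((dictnum.filter (fun kv => decide (PySem.Str.pyGet? kv.1 i = some '0'))).map
            (fun kv => kv.2 * pweight (pathOf kv.1.toList i))).sum
          = 3 * ((dictnum.filter (fun kv => decide (PySem.Str.pyGet? kv.1 i = some '0'))).map
            (fun kv => kv.2 * pweight (pathOf kv.1.toList (i + 3)))).sum := by
        rw [← List.sum_map_mul_left]
        apply congrArg List.sum
        apply List.map_congr_left
        intro kv hm
        have hmem := List.mem_of_mem_filter hm
        have hv := hvalid kv hmem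
        have hp0 : decide (PySem.Str.pyGet? kv.1 i = some '0') = true := (List.mem_filter.mp hm).2
        have hbit : (kv.1.toList.getD i.toNat ' ' == '0') = true := by
          rw [hhead kv hmem, pathOf_cons h0 hv] at hp0
          simpa using hp0
        rw [pathOf_cons h0 hv, pweight_cons, hbit]
        simp; ring
      have hsum1 : ((dictnum.filter (fun kv => !decide (PySem.Str.pyGet? kv.1 i = some '0'))).map
            (fun kv => kv.2 * pweight (pathOf kv.1.toList i))).sum
          = 2 * ((dictnum.filter (fun kv => !decide (PySem.Str.pyGet? kv.1 i = some '0'))).map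
            (fun kv => kv.2 * pweight (pathOf kv.1.toList (i + 3)))).sum := by
        rw [← List.sum_map_mul_left]
        apply congrArg List.sum
        apply List.map_congr_left
        intro kv hm
        have hmem := List.mem_of_mem_filter hm
        have hv := hvalid kv hmem
        have hp0 : (!decide (PySem.Str.pyGet? kv.1 i = some '0')) = true := (List.mem_filter.mp hm).2
        have hbit : (kv.1.toList.getD i.toNat ' ' == '0') = false := by
          rw [Bool.not_eq_true'] at hp0
          rw [hhead kv hmem, pathOf_cons h0 hv] at hp0
          simpa using hp0
        rw [pathOf_cons h0 hv, pweight_cons, hbit]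
        simp; ring
      rw [hsum0, hsum1]


theorem le_maxLen (P : List (List Bool)) : ∀ p ∈ P, p.length ≤ maxLen P := by
  induction P with
  | nil => intro p hp; simp at hp
  | cons q Q ih =>
    intro p hp
    rcases List.mem_cons.mp hp with rfl | hm
    · simp [maxLen]
    · exact le_trans (ih p hm) (by simp [maxLen])

theorem kraft_mul_pow (M : Nat) : ∀ (P : List (List Bool)), (∀ p ∈ P, p.length ≤ M) →
    kraft P * 2 ^ M = ((kraftN P M : Nat) : ℚ) := by
  intro P
  induction P with
  | nil => intro _; simp [kraft, kraftN]
  | cons p Q ih =>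
    intro hM
    have hp : p.length ≤ M := hM p (by simp)
    have hQ := ih (fun q hq => hM q (by simp [hq]))
    simp only [kraft, kraftN, List.map_cons, List.sum_cons] at hQ ⊢
    push_cast
    rw [add_mul, hQ]
    have hsplit : (2:ℚ) ^ M = 2 ^ p.length * 2 ^ (M - p.length) := by
      rw [← pow_add, Nat.add_sub_cancel' hp]
    rw [hsplit, ← mul_assoc]
    have hone : ((1:ℚ) / 2) ^ p.length * 2 ^ p.length = 1 := by
      rw [← mul_pow]; norm_num
    rw [hone, one_mul]
    rw [Nat.cast_list_sum]

theorem kraft_eq_one_of_kraftN (P : List (List Bool))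
    (h : kraftN P (maxLen P) = 2 ^ maxLen P) : kraft P = 1 := by
  have hb := kraft_mul_pow (maxLen P) P (le_maxLen P)
  rw [h] at hb
  have h2 : ((2:ℚ)) ^ maxLen P ≠ 0 := by positivity
  have : kraft P * 2 ^ maxLen P = 2 ^ maxLen P := by rw [hb]; push_cast; ring
  field_simp at this
  exact this

theorem magnitudeDict_spec : Claim_equal_magnitudeDict := by
  intro dictnum i _ hpre
  unfold Spec_magnitudeDict
  by_cases h1 : dictnum.length = 1
  · obtain ⟨kv, rfl⟩ := List.length_eq_one_iff.mp h1
    rw [magnitudeDict]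
    unfold magnitudeDict_alt
    simp
  · rcases hpre with h1' | ⟨h0, hpf, hkN⟩
    · exact absurd h1' h1
    have hk : kraft (pathsOf dictnum i) = 1 := kraft_eq_one_of_kraftN _ hkN
    rw [A_eq dictnum.length dictnum i le_rfl h0 hpf hk, B_eq dictnum i h1 h0]
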